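-- pv_equiv track=rewrite | github.com/all-of-us/raw-data-repository | rdr_service/resource/calculators/participant_ubr.py | ubr_access_to_care
-- ===== SOURCE A (Python) =====
-- from enum import IntEnum
--
-- class UBRValueEnum(IntEnum):
--
--     RBR = 0
--     UBR = 1
--     # NotAnswer_Skip: Answer is Null (only if a TheBasics has been submitted), PMI_PreferNotToAnswer or PMI_Skip value.
--     NotAnswer_Skip = 2
--
-- def ubr_access_to_care(answers):
--     """
--     Diversity Category - Access to Care
--     Calculate the Access to Care UBR value for participants
--     This can be calculated on the response to the Basics 'insurance_healthinsurance' question alone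
--     :param answers: Dict with keys and answer codes for thebasics and access to care questions
--     :return: UBRValueEnum
--     """
--     # if answers or True:
--     #     return None
--
--     # Questions on access to care.
--     if answers.get('insurance_healthinsurance', None) == 'HealthInsurance_No':
--         return UBRValueEnum.UBR
--     if answers.get('healthadvice_placeforhealthadvice', None) == 'PlaceforHealthAdvice_No':
--         return UBRValueEnum.UBR
--
--     if answers.get('healthadvice_whatkindofplace', None) == 'WhatKindOfPlace_EmergencyRoom':
--         return UBRValueEnum.UBR
--
--     if (answers.get('delayedmedicalcare_cantaffordcopay', None) == 'CantAffordCoPay_Yes'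
--             or answers.get('delayedmedicalcare_deductibletoohigh', None) == 'DeductibleTooHigh_Yes'
--             or answers.get('delayedmedicalcare_hadtopayoutofpocket', None) == 'HadToPayOutOfPocket_Yes'
--             or answers.get('delayedmedicalcare_ruralarea', None) == 'RuralArea_Yes'):
--         return UBRValueEnum.UBR
--
--     if (answers.get('cantaffordcare_prescriptionmedicines', None) == 'PrescriptionMedicines_Yes'
--             or answers.get('cantaffordcare_mentalhealthcounseling', None) == 'MentalHealthCounseling_Yes'
--             or answers.get('cantaffordcare_emergencycare', None) == 'EmergencyCare_Yes'
--             or answers.get('cantaffordcare_dentalcare', None) == 'DentalCare_Yes'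
--             or answers.get('cantaffordcare_eyeglasses', None) == 'Eyeglasses_Yes'
--             or answers.get('cantaffordcare_healthcareprovider', None) == 'HealthcareProvider_Yes'
--             or answers.get('cantaffordcare_specialist', None) == 'Specialist_Yes'
--             or answers.get('cantaffordcare_followupcare', None) == 'FollowupCare_Yes'):
--         return UBRValueEnum.UBR
--
--     if (answers.get('cantaffordcare_skippedmedtosavemoney', None) == 'SkippedMedToSaveMoney_Yes'
--             or answers.get('cantaffordcare_tooklessmedtosavemoney', None) == 'TookLessMedToSaveMoney_Yes'
--             or answers.get('cantaffordcare_delayedfillingrxtosavemoney',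
--                            None) == 'DelayedFillingRxToSaveMoney_Yes'):
--         return UBRValueEnum.UBR
--
--     # Remaining questions that, in combination of 2 or more qualifying answers, calculate to UBR
--     answer_count = 0
--     for k in ['delayedmedicalcare_transportation', 'delayedmedicalcare_timeoffwork', 'delayedmedicalcare_childcare',
--               'delayedmedicalcare_elderlycare', 'healthproviderracereligion_delayedornocare']:
--
--         if k == 'healthproviderracereligion_delayedornocare' and answers.get(k, None) in \
--                 ('DelayedOrNoCare_Always', 'DelayedOrNoCare_MostOfTheTime', 'DelayedOrNoCare_SomeOfTheTime'):
--             answer_count += 1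
--
--         if answers.get(k, None) in ('Transportation_Yes', 'TimeOffWork_Yes', 'ChildCare_Yes', 'ElderlyCare_Yes'):
--             answer_count += 1
--
--     if answer_count >= 2:
--         return UBRValueEnum.UBR
--
--     # TODO:   Confirm PMI_DontKnow answers should resolve to RBR
--     # There is a possibility that someone who has skipped a lot of questions needs to be re calculated
--     null_skip = True
--     for k in ['insurance_healthinsurance', 'healthadvice_placeforhealthadvice']:
--         if answers.get(k, None) not in [None, 'PMI_Skip', 'PMI_PreferNotToAnswer']:
--             null_skip = False
--             break
--     if null_skip is True:
--         return UBRValueEnum.NotAnswer_Skip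
--     else:
--         return UBRValueEnum.RBR
-- ===== SOURCE B (Python) =====
-- # Single pass over the submitted answers: classify each (question, answer) pair
-- # against static pair-sets instead of doing per-rule dict lookups through an if-chain.
--
-- DEFINITE_PAIRS = frozenset([
--     ('insurance_healthinsurance', 'HealthInsurance_No'),
--     ('healthadvice_placeforhealthadvice', 'PlaceforHealthAdvice_No'),
--     ('healthadvice_whatkindofplace', 'WhatKindOfPlace_EmergencyRoom'),
--     ('delayedmedicalcare_cantaffordcopay', 'CantAffordCoPay_Yes'),
--     ('delayedmedicalcare_deductibletoohigh', 'DeductibleTooHigh_Yes'),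
--     ('delayedmedicalcare_hadtopayoutofpocket', 'HadToPayOutOfPocket_Yes'),
--     ('delayedmedicalcare_ruralarea', 'RuralArea_Yes'),
--     ('cantaffordcare_prescriptionmedicines', 'PrescriptionMedicines_Yes'),
--     ('cantaffordcare_mentalhealthcounseling', 'MentalHealthCounseling_Yes'),
--     ('cantaffordcare_emergencycare', 'EmergencyCare_Yes'),
--     ('cantaffordcare_dentalcare', 'DentalCare_Yes'),
--     ('cantaffordcare_eyeglasses', 'Eyeglasses_Yes'),
--     ('cantaffordcare_healthcareprovider', 'HealthcareProvider_Yes'),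
--     ('cantaffordcare_specialist', 'Specialist_Yes'),
--     ('cantaffordcare_followupcare', 'FollowupCare_Yes'),
--     ('cantaffordcare_skippedmedtosavemoney', 'SkippedMedToSaveMoney_Yes'),
--     ('cantaffordcare_tooklessmedtosavemoney', 'TookLessMedToSaveMoney_Yes'),
--     ('cantaffordcare_delayedfillingrxtosavemoney', 'DelayedFillingRxToSaveMoney_Yes'),
-- ])
--
-- _COUNT_KEYS = ('delayedmedicalcare_transportation', 'delayedmedicalcare_timeoffwork',
--                'delayedmedicalcare_childcare', 'delayedmedicalcare_elderlycare',
--                'healthproviderracereligion_delayedornocare')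
-- _YES_VALUES = ('Transportation_Yes', 'TimeOffWork_Yes', 'ChildCare_Yes', 'ElderlyCare_Yes')
-- COUNT_PAIRS = frozenset(
--     [(k, v) for k in _COUNT_KEYS for v in _YES_VALUES]
--     + [('healthproviderracereligion_delayedornocare', lvl)
--        for lvl in ('DelayedOrNoCare_Always', 'DelayedOrNoCare_MostOfTheTime',
--                    'DelayedOrNoCare_SomeOfTheTime')])
--
-- SKIP_KEYS = frozenset(['insurance_healthinsurance', 'healthadvice_placeforhealthadvice'])
-- SKIP_VALUES = frozenset(['PMI_Skip', 'PMI_PreferNotToAnswer'])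
--
--
-- def ubr_access_to_care(answers):
--     definite = False
--     count = 0
--     answered_skip_key = False
--     for k, v in answers.items():
--         if (k, v) in DEFINITE_PAIRS:
--             definite = True
--         if (k, v) in COUNT_PAIRS:
--             count += 1
--         if k in SKIP_KEYS and v not in SKIP_VALUES:
--             answered_skip_key = True
--     if definite or count >= 2:
--         return 1  # UBRValueEnum.UBR
--     return 0 if answered_skip_key else 2  # RBR vs NotAnswer_Skip
-- ===== Notes on version B (the rewrite author's own statement) =====
-- stated objective: alternative
-- what changed: Inverts the traversal: instead of A's 25 per-rule dict lookups through a flat if-chain and two accumulator loops, B makes one pass over the submitted (question, answer) items, classifying each pair against static pair-sets (definite-UBR pairs, countable pairs, skip keys/values) and accumulating a definite flag, a qualifying count and an answered-skip-key flag.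
import Mathlib
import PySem

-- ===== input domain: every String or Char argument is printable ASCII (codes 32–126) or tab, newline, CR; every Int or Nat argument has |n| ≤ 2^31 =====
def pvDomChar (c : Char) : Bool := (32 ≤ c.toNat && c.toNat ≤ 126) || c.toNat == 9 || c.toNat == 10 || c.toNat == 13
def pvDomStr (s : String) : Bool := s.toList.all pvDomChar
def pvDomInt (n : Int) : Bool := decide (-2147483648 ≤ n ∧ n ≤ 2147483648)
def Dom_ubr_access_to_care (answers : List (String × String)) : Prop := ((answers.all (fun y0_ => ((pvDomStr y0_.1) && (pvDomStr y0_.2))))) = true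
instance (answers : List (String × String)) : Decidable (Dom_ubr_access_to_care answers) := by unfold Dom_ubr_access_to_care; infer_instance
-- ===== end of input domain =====

-- B makes ONE pass over the submitted (question, answer) pairs, classifying each pair against
-- static pair-sets, instead of A's per-rule dict lookups through an if-chain (objective: alternative).

-- answers.get(k, None): first-match lookup in the association list (Python dict)
def pvGet (answers : List (String × String)) (k : String) : Option String :=
  (PySem.Dict.mk answers).get? k

-- ===== PORT A =====
def ubr_access_to_care (answers : List (String × String)) : Int :=
  if pvGet answers "insurance_healthinsurance" == some "HealthInsurance_No" then 1
  else if pvGet answers "healthadvice_placeforhealthadvice" == some "PlaceforHealthAdvice_No" then 1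
  else if pvGet answers "healthadvice_whatkindofplace" == some "WhatKindOfPlace_EmergencyRoom" then 1
  else if (pvGet answers "delayedmedicalcare_cantaffordcopay" == some "CantAffordCoPay_Yes"
        || pvGet answers "delayedmedicalcare_deductibletoohigh" == some "DeductibleTooHigh_Yes"
        || pvGet answers "delayedmedicalcare_hadtopayoutofpocket" == some "HadToPayOutOfPocket_Yes"
        || pvGet answers "delayedmedicalcare_ruralarea" == some "RuralArea_Yes") then 1
  else if (pvGet answers "cantaffordcare_prescriptionmedicines" == some "PrescriptionMedicines_Yes"
        || pvGet answers "cantaffordcare_mentalhealthcounseling" == some "MentalHealthCounseling_Yes"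
        || pvGet answers "cantaffordcare_emergencycare" == some "EmergencyCare_Yes"
        || pvGet answers "cantaffordcare_dentalcare" == some "DentalCare_Yes"
        || pvGet answers "cantaffordcare_eyeglasses" == some "Eyeglasses_Yes"
        || pvGet answers "cantaffordcare_healthcareprovider" == some "HealthcareProvider_Yes"
        || pvGet answers "cantaffordcare_specialist" == some "Specialist_Yes"
        || pvGet answers "cantaffordcare_followupcare" == some "FollowupCare_Yes") then 1
  else if (pvGet answers "cantaffordcare_skippedmedtosavemoney" == some "SkippedMedToSaveMoney_Yes"
        || pvGet answers "cantaffordcare_tooklessmedtosavemoney" == some "TookLessMedToSaveMoney_Yes"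
        || pvGet answers "cantaffordcare_delayedfillingrxtosavemoney" == some "DelayedFillingRxToSaveMoney_Yes") then 1
  else
    -- for k in [...]: two ifs incrementing answer_count
    let answer_count : Int :=
      (["delayedmedicalcare_transportation", "delayedmedicalcare_timeoffwork", "delayedmedicalcare_childcare",
        "delayedmedicalcare_elderlycare", "healthproviderracereligion_delayedornocare"] : List String).foldl
        (fun cnt k =>
          (cnt
            + (if k == "healthproviderracereligion_delayedornocare"
                  && ([some "DelayedOrNoCare_Always", some "DelayedOrNoCare_MostOfTheTime",
                       some "DelayedOrNoCare_SomeOfTheTime"] : List (Option String)).contains (pvGet answers k)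
               then 1 else 0))
            + (if ([some "Transportation_Yes", some "TimeOffWork_Yes", some "ChildCare_Yes",
                    some "ElderlyCare_Yes"] : List (Option String)).contains (pvGet answers k)
               then 1 else 0)) 0
    if answer_count ≥ 2 then 1
    else
      -- null-skip loop with early break ≡ all keys have a null/skip answer
      if (["insurance_healthinsurance", "healthadvice_placeforhealthadvice"] : List String).all
           (fun k => ([none, some "PMI_Skip", some "PMI_PreferNotToAnswer"] : List (Option String)).contains (pvGet answers k))
        then 2 else 0

-- ===== PORT B =====
def pvDefinitePairs : List (String × String) :=
  [("insurance_healthinsurance", "HealthInsurance_No"),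
   ("healthadvice_placeforhealthadvice", "PlaceforHealthAdvice_No"),
   ("healthadvice_whatkindofplace", "WhatKindOfPlace_EmergencyRoom"),
   ("delayedmedicalcare_cantaffordcopay", "CantAffordCoPay_Yes"),
   ("delayedmedicalcare_deductibletoohigh", "DeductibleTooHigh_Yes"),
   ("delayedmedicalcare_hadtopayoutofpocket", "HadToPayOutOfPocket_Yes"),
   ("delayedmedicalcare_ruralarea", "RuralArea_Yes"),
   ("cantaffordcare_prescriptionmedicines", "PrescriptionMedicines_Yes"),
   ("cantaffordcare_mentalhealthcounseling", "MentalHealthCounseling_Yes"),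
   ("cantaffordcare_emergencycare", "EmergencyCare_Yes"),
   ("cantaffordcare_dentalcare", "DentalCare_Yes"),
   ("cantaffordcare_eyeglasses", "Eyeglasses_Yes"),
   ("cantaffordcare_healthcareprovider", "HealthcareProvider_Yes"),
   ("cantaffordcare_specialist", "Specialist_Yes"),
   ("cantaffordcare_followupcare", "FollowupCare_Yes"),
   ("cantaffordcare_skippedmedtosavemoney", "SkippedMedToSaveMoney_Yes"),
   ("cantaffordcare_tooklessmedtosavemoney", "TookLessMedToSaveMoney_Yes"),
   ("cantaffordcare_delayedfillingrxtosavemoney", "DelayedFillingRxToSaveMoney_Yes")]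

-- COUNT_PAIRS: the 5 count-group keys × the 4 *_Yes values, plus the race-religion key × its 3 levels
def pvCountPairs : List (String × String) :=
  (["delayedmedicalcare_transportation", "delayedmedicalcare_timeoffwork",
    "delayedmedicalcare_childcare", "delayedmedicalcare_elderlycare",
    "healthproviderracereligion_delayedornocare"] : List String).flatMap
    (fun k => [(k, "Transportation_Yes"), (k, "TimeOffWork_Yes"),
               (k, "ChildCare_Yes"), (k, "ElderlyCare_Yes")])
  ++ [("healthproviderracereligion_delayedornocare", "DelayedOrNoCare_Always"),
      ("healthproviderracereligion_delayedornocare", "DelayedOrNoCare_MostOfTheTime"),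
      ("healthproviderracereligion_delayedornocare", "DelayedOrNoCare_SomeOfTheTime")]

def pvSkipKeys : List String := ["insurance_healthinsurance", "healthadvice_placeforhealthadvice"]
def pvSkipValues : List String := ["PMI_Skip", "PMI_PreferNotToAnswer"]

-- one pass over answers.items(), accumulating (definite, count, answered_skip_key)
def ubr_access_to_care_alt (answers : List (String × String)) : Int :=
  let st : Bool × Int × Bool := answers.foldl
    (fun st kv =>
      (st.1 || pvDefinitePairs.contains kv,
       st.2.1 + (if pvCountPairs.contains kv then 1 else 0),
       st.2.2 || (pvSkipKeys.contains kv.1 && !pvSkipValues.contains kv.2)))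
    (false, 0, false)
  if st.1 || decide (st.2.1 ≥ 2) then 1
  else if st.2.2 then 0 else 2

-- ===== PRECONDITION & SPEC =====
-- answers is a Python dict, so the association list the convention hands us always has pairwise
-- distinct keys; Pre_ states exactly that dict invariant (no actual Python input is excluded).
def Pre_ubr_access_to_care (answers : List (String × String)) : Prop :=
  (answers.map Prod.fst).Nodup
instance (answers : List (String × String)) : Decidable (Pre_ubr_access_to_care answers) := by unfold Pre_ubr_access_to_care; infer_instance

def pvWitness_ubr_access_to_care : (List (String × String)) :=
  [("insurance_healthinsurance", "PMI_Skip"), ("delayedmedicalcare_childcare", "ChildCare_Yes")]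

def Spec_ubr_access_to_care (answers : List (String × String)) (out : Int) : Prop := out = ubr_access_to_care_alt answers
instance (answers : List (String × String)) (out : Int) : Decidable (Spec_ubr_access_to_care answers out) := by unfold Spec_ubr_access_to_care; infer_instance

-- ===== CLAIM (what is proved, stated in full; the proofs are below) =====
def Claim_equal_ubr_access_to_care : Prop := ∀ (answers : List (String × String)), Dom_ubr_access_to_care answers → Pre_ubr_access_to_care answers → Spec_ubr_access_to_care answers (ubr_access_to_care answers)

-- ===== LEMMAS AND PROOFS =====

-- B's fold characterized: flag/count/flag are any / countP / any over the items
theorem pvFold_char (answers : List (String × String)) (st : Bool × Int × Bool) :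
    answers.foldl
      (fun st kv =>
        (st.1 || pvDefinitePairs.contains kv,
         st.2.1 + (if pvCountPairs.contains kv then 1 else 0),
         st.2.2 || (pvSkipKeys.contains kv.1 && !pvSkipValues.contains kv.2)))
      st
    = (st.1 || answers.any (fun kv => pvDefinitePairs.contains kv),
       st.2.1 + (answers.countP (fun kv => pvCountPairs.contains kv) : Int),
       st.2.2 || answers.any (fun kv => pvSkipKeys.contains kv.1 && !pvSkipValues.contains kv.2)) := by
  induction answers generalizing st with
  | nil => simp
  | cons hd tl ih =>
    simp only [List.foldl_cons, ih, List.any_cons, List.countP_cons]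
    refine Prod.ext ?_ (Prod.ext ?_ ?_) <;> simp [Bool.or_assoc] <;> split_ifs <;> push_cast <;> ring

-- pvGet on a cons
theorem pvGet_cons (k₀ v₀ : String) (tl : List (String × String)) (k : String) :
    pvGet ((k₀, v₀) :: tl) k = if k₀ == k then some v₀ else pvGet tl k := by
  simp [pvGet, PySem.Dict.get?_mk_cons]

-- key absent ⇒ no item with that key satisfies anything
theorem pv_countP_of_not_mem (answers : List (String × String)) (k : String)
    (h : k ∉ answers.map Prod.fst) (P : String → String → Bool) :
    answers.countP (fun kv => kv.1 == k && P kv.1 kv.2) = 0 := by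
  induction answers with
  | nil => simp
  | cons hd tl ih =>
    simp only [List.map_cons, List.mem_cons, not_or] at h
    simp only [List.countP_cons]
    have : (hd.1 == k) = false := by
      simp only [beq_eq_false_iff_ne]; exact fun e => h.1 e.symm
    simp [this, ih h.2]

-- single-key countP: with nodup keys, the items with key k contribute exactly the looked-up value
theorem pv_countP_single (answers : List (String × String))
    (h : (answers.map Prod.fst).Nodup) (k : String) (P : String → String → Bool) :
    answers.countP (fun kv => kv.1 == k && P kv.1 kv.2)
      = if (pvGet answers k).any (P k) then 1 else 0 := by
  induction answers with
  | nil => simp [pvGet, PySem.Dict.get?]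
  | cons hd tl ih =>
    simp only [List.map_cons, List.nodup_cons] at h
    rw [show hd = (hd.1, hd.2) from rfl]
    simp only [List.countP_cons, pvGet_cons]
    by_cases e : hd.1 = k
    · subst e
      have h0 := pv_countP_of_not_mem tl hd.1 h.1 P
      simp only [beq_self_eq_true, if_true, Bool.true_and, h0]
      split_ifs with h1 h2 h2 <;> simp_all
    · have : (hd.1 == k) = false := by simp [e]
      simp [this, ih h.2]

theorem pv_any_single (answers : List (String × String))
    (h : (answers.map Prod.fst).Nodup) (k : String) (P : String → String → Bool) :
    answers.any (fun kv => kv.1 == k && P kv.1 kv.2) = (pvGet answers k).any (P k) := by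
  have h1 := pv_countP_single answers h k P
  rcases hb : (pvGet answers k).any (P k) with _ | _ <;> rw [hb] at h1 <;> simp at h1
  · simpa [List.countP_eq_zero] using h1
  · rw [List.any_eq_true]
    rw [← List.countP_pos_iff]
    omega

-- countP splits over a disjunction whose two sides never both hold
theorem pv_countP_or {α : Type} (l : List α) (a b P : α → Bool)
    (hd : ∀ x, ¬(a x = true ∧ b x = true)) :
    l.countP (fun x => (a x || b x) && P x)
      = l.countP (fun x => a x && P x) + l.countP (fun x => b x && P x) := by
  induction l with
  | nil => simp
  | cons hd' tl ih =>
    simp only [List.countP_cons, ih]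
    have := hd hd'
    rcases ha : a hd' <;> rcases hb : b hd' <;> simp_all <;> split_ifs <;> omega

-- MASTER (count): one-pass count over items = per-rule-key lookups, given distinct keys
theorem pv_countP_master (answers : List (String × String))
    (h : (answers.map Prod.fst).Nodup) (K : List String) (hK : K.Nodup)
    (P : String → String → Bool) :
    answers.countP (fun kv => K.contains kv.1 && P kv.1 kv.2)
      = K.countP (fun k => (pvGet answers k).any (P k)) := by
  induction K with
  | nil => simp
  | cons k K' ih =>
    simp only [List.nodup_cons] at hK
    have hfun : (fun kv : String × String => (k :: K').contains kv.1 && P kv.1 kv.2)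
        = (fun kv : String × String => ((kv.1 == k || K'.contains kv.1) && P kv.1 kv.2)) := by
      funext kv
      have hb : (kv.1 == k) = decide (k = kv.1) := by
        by_cases hkv : kv.1 = k
        · subst hkv; simp
        · simp [hkv, Ne.symm hkv]
      rw [hb]
      simp [eq_comm]
    rw [hfun, pv_countP_or answers (fun kv => kv.1 == k) (fun kv => K'.contains kv.1)
      (fun kv => P kv.1 kv.2) (by
        rintro ⟨x, y⟩ ⟨hx, hy⟩
        simp only [beq_iff_eq] at hx
        subst hx
        exact hK.1 (by simpa using hy))]
    rw [pv_countP_single answers h k P, ih hK.2]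
    simp only [List.countP_cons]
    omega

-- anyone of a disjunction splits
theorem pv_any_or {α : Type} (l : List α) (a b : α → Bool) :
    l.any (fun x => a x || b x) = (l.any a || l.any b) := by
  induction l with
  | nil => simp
  | cons hd tl ih =>
    simp only [List.any_cons, ih]
    rcases a hd <;> rcases b hd <;> simp

-- MASTER (any): one-pass flag over items = per-rule-key lookups, given distinct keys
theorem pv_any_master (answers : List (String × String))
    (h : (answers.map Prod.fst).Nodup) (K : List String) (P : String → String → Bool) :
    answers.any (fun kv => K.contains kv.1 && P kv.1 kv.2)
      = K.any (fun k => (pvGet answers k).any (P k)) := by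
  induction K with
  | nil => simp
  | cons k K' ih =>
    have hfun : (fun kv : String × String => (k :: K').contains kv.1 && P kv.1 kv.2)
        = (fun kv : String × String =>
            ((kv.1 == k && P kv.1 kv.2) || (K'.contains kv.1 && P kv.1 kv.2))) := by
      funext kv
      have hb : (kv.1 == k) = decide (k = kv.1) := by
        by_cases hkv : kv.1 = k
        · subst hkv; simp
        · simp [hkv, Ne.symm hkv]
      rw [hb]
      simp [Bool.and_or_distrib_right, eq_comm]
    rw [hfun, pv_any_or, pv_any_single answers h k P, ih]
    simp

-- a pair in R has its key among R's keys (used to bring predicates into master form)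
theorem pv_pred_key (R : List (String × String)) (K : List String)
    (hsub : ∀ kv ∈ R, K.contains kv.1 = true) (kv : String × String) :
    R.contains kv = (K.contains kv.1 && R.contains kv) := by
  rcases h : R.contains kv
  · simp
  · have hm : kv ∈ R := by simpa using h
    have := hsub kv hm
    simp only [List.contains_iff_mem] at this ⊢
    simp [this]

theorem pv_optAny_beq (o : Option String) (t : String) :
    Option.any (fun v => v == t) o = (o == some t) := by
  cases o <;> simp

theorem pv_optAny_or (o : Option String) (f g : String → Bool) :
    Option.any (fun v => f v || g v) o = (Option.any f o || Option.any g o) := by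
  cases o <;> simp

theorem pv_optAny_false (o : Option String) : Option.any (fun _ => false) o = false := by
  cases o <;> simp

theorem pv_optAny_not2 (o : Option String) (s₁ s₂ : String) :
    Option.any (fun v => !(v == s₁ || v == s₂)) o
      = !(o == none || (o == some s₁ || o == some s₂)) := by
  cases o <;> simp

theorem pv_pair_beq (a b c d : String) : ((a, b) == (c, d)) = ((a == c) && (b == d)) := rfl

theorem pvCountPairs_eq : pvCountPairs = [("delayedmedicalcare_transportation", "Transportation_Yes"),
   ("delayedmedicalcare_transportation", "TimeOffWork_Yes"),
   ("delayedmedicalcare_transportation", "ChildCare_Yes"),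
   ("delayedmedicalcare_transportation", "ElderlyCare_Yes"),
   ("delayedmedicalcare_timeoffwork", "Transportation_Yes"),
   ("delayedmedicalcare_timeoffwork", "TimeOffWork_Yes"),
   ("delayedmedicalcare_timeoffwork", "ChildCare_Yes"),
   ("delayedmedicalcare_timeoffwork", "ElderlyCare_Yes"),
   ("delayedmedicalcare_childcare", "Transportation_Yes"),
   ("delayedmedicalcare_childcare", "TimeOffWork_Yes"),
   ("delayedmedicalcare_childcare", "ChildCare_Yes"),
   ("delayedmedicalcare_childcare", "ElderlyCare_Yes"),
   ("delayedmedicalcare_elderlycare", "Transportation_Yes"),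
   ("delayedmedicalcare_elderlycare", "TimeOffWork_Yes"),
   ("delayedmedicalcare_elderlycare", "ChildCare_Yes"),
   ("delayedmedicalcare_elderlycare", "ElderlyCare_Yes"),
   ("healthproviderracereligion_delayedornocare", "Transportation_Yes"),
   ("healthproviderracereligion_delayedornocare", "TimeOffWork_Yes"),
   ("healthproviderracereligion_delayedornocare", "ChildCare_Yes"),
   ("healthproviderracereligion_delayedornocare", "ElderlyCare_Yes"),
   ("healthproviderracereligion_delayedornocare", "DelayedOrNoCare_Always"),
   ("healthproviderracereligion_delayedornocare", "DelayedOrNoCare_MostOfTheTime"),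
   ("healthproviderracereligion_delayedornocare", "DelayedOrNoCare_SomeOfTheTime")] := by rfl

-- ===== VERDICT (by name: the statement is the Claim_ definition above) =====
set_option maxHeartbeats 4000000 in
set_option maxRecDepth 10000 in
theorem ubr_access_to_care_spec : Claim_equal_ubr_access_to_care := by
  intro answers _ hpre
  unfold Spec_ubr_access_to_care
  unfold ubr_access_to_care ubr_access_to_care_alt
  rw [pvFold_char]
  rw [show (fun kv : String × String => pvDefinitePairs.contains kv)
      = (fun kv : String × String =>
          (pvDefinitePairs.map Prod.fst).contains kv.1 && pvDefinitePairs.contains (kv.1, kv.2)) from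
    funext fun kv => pv_pred_key pvDefinitePairs (pvDefinitePairs.map Prod.fst) (by decide) kv]
  rw [show (fun kv : String × String => pvCountPairs.contains kv)
      = (fun kv : String × String =>
          (["delayedmedicalcare_transportation", "delayedmedicalcare_timeoffwork",
            "delayedmedicalcare_childcare", "delayedmedicalcare_elderlycare",
            "healthproviderracereligion_delayedornocare"] : List String).contains kv.1
          && pvCountPairs.contains (kv.1, kv.2)) from
    funext fun kv => pv_pred_key pvCountPairs _ (by decide) kv]
  rw [pv_any_master answers hpre (pvDefinitePairs.map Prod.fst)
        (fun k v => pvDefinitePairs.contains (k, v)),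
      pv_countP_master answers hpre _ (by decide) (fun k v => pvCountPairs.contains (k, v)),
      pv_any_master answers hpre pvSkipKeys (fun _ v => !pvSkipValues.contains v)]
  simp only [pvDefinitePairs, pvCountPairs_eq, pvSkipKeys, pvSkipValues,
    List.map_cons, List.map_nil, List.any_cons, List.any_nil, List.countP_cons, List.countP_nil,
    List.foldl_cons, List.foldl_nil, List.all_cons, List.all_nil,
    List.contains_cons, List.contains_nil, pv_pair_beq, String.reduceBEq,
    Bool.false_or, Bool.or_false, Bool.false_and, Bool.true_and, Bool.and_true, Bool.and_false,
    Bool.false_eq_true, if_false, pv_optAny_or, pv_optAny_beq, pv_optAny_not2, pv_optAny_false]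
  generalize (pvGet answers "insurance_healthinsurance" == some "HealthInsurance_No") = d1
  generalize (pvGet answers "healthadvice_placeforhealthadvice" == some "PlaceforHealthAdvice_No") = d2
  generalize (pvGet answers "healthadvice_whatkindofplace" == some "WhatKindOfPlace_EmergencyRoom") = d3
  generalize (pvGet answers "delayedmedicalcare_cantaffordcopay" == some "CantAffordCoPay_Yes") = d4
  generalize (pvGet answers "delayedmedicalcare_deductibletoohigh" == some "DeductibleTooHigh_Yes") = d5
  generalize (pvGet answers "delayedmedicalcare_hadtopayoutofpocket" == some "HadToPayOutOfPocket_Yes") = d6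
  generalize (pvGet answers "delayedmedicalcare_ruralarea" == some "RuralArea_Yes") = d7
  generalize (pvGet answers "cantaffordcare_prescriptionmedicines" == some "PrescriptionMedicines_Yes") = d8
  generalize (pvGet answers "cantaffordcare_mentalhealthcounseling" == some "MentalHealthCounseling_Yes") = d9
  generalize (pvGet answers "cantaffordcare_emergencycare" == some "EmergencyCare_Yes") = d10
  generalize (pvGet answers "cantaffordcare_dentalcare" == some "DentalCare_Yes") = d11
  generalize (pvGet answers "cantaffordcare_eyeglasses" == some "Eyeglasses_Yes") = d12
  generalize (pvGet answers "cantaffordcare_healthcareprovider" == some "HealthcareProvider_Yes") = d13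
  generalize (pvGet answers "cantaffordcare_specialist" == some "Specialist_Yes") = d14
  generalize (pvGet answers "cantaffordcare_followupcare" == some "FollowupCare_Yes") = d15
  generalize (pvGet answers "cantaffordcare_skippedmedtosavemoney" == some "SkippedMedToSaveMoney_Yes") = d16
  generalize (pvGet answers "cantaffordcare_tooklessmedtosavemoney" == some "TookLessMedToSaveMoney_Yes") = d17
  generalize (pvGet answers "cantaffordcare_delayedfillingrxtosavemoney" == some "DelayedFillingRxToSaveMoney_Yes") = d18
  generalize (pvGet answers "delayedmedicalcare_transportation" == some "Transportation_Yes" || (pvGet answers "delayedmedicalcare_transportation" == some "TimeOffWork_Yes" || (pvGet answers "delayedmedicalcare_transportation" == some "ChildCare_Yes" || pvGet answers "delayedmedicalcare_transportation" == some "ElderlyCare_Yes"))) = y1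
  generalize (pvGet answers "delayedmedicalcare_timeoffwork" == some "Transportation_Yes" || (pvGet answers "delayedmedicalcare_timeoffwork" == some "TimeOffWork_Yes" || (pvGet answers "delayedmedicalcare_timeoffwork" == some "ChildCare_Yes" || pvGet answers "delayedmedicalcare_timeoffwork" == some "ElderlyCare_Yes"))) = y2
  generalize (pvGet answers "delayedmedicalcare_childcare" == some "Transportation_Yes" || (pvGet answers "delayedmedicalcare_childcare" == some "TimeOffWork_Yes" || (pvGet answers "delayedmedicalcare_childcare" == some "ChildCare_Yes" || pvGet answers "delayedmedicalcare_childcare" == some "ElderlyCare_Yes"))) = y3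
  generalize (pvGet answers "delayedmedicalcare_elderlycare" == some "Transportation_Yes" || (pvGet answers "delayedmedicalcare_elderlycare" == some "TimeOffWork_Yes" || (pvGet answers "delayedmedicalcare_elderlycare" == some "ChildCare_Yes" || pvGet answers "delayedmedicalcare_elderlycare" == some "ElderlyCare_Yes"))) = y4
  generalize (pvGet answers "insurance_healthinsurance" == none || (pvGet answers "insurance_healthinsurance" == some "PMI_Skip" || pvGet answers "insurance_healthinsurance" == some "PMI_PreferNotToAnswer")) = c1
  generalize (pvGet answers "healthadvice_placeforhealthadvice" == none || (pvGet answers "healthadvice_placeforhealthadvice" == some "PMI_Skip" || pvGet answers "healthadvice_placeforhealthadvice" == some "PMI_PreferNotToAnswer")) = c2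
  cases d1
  case true => simp
  cases d2
  case true => simp
  cases d3
  case true => simp
  cases d4
  case true => simp
  cases d5
  case true => simp
  cases d6
  case true => simp
  cases d7
  case true => simp
  cases d8
  case true => simp
  cases d9
  case true => simp
  cases d10
  case true => simp
  cases d11
  case true => simp
  cases d12
  case true => simp
  cases d13
  case true => simp
  cases d14
  case true => simp
  cases d15
  case true => simp
  cases d16
  case true => simp
  cases d17
  case true => simp
  cases d18
  case true => simp
  generalize pvGet answers "healthproviderracereligion_delayedornocare" = o
  rcases o with _ | v
  · cases y1 <;> cases y2 <;> cases y3 <;> cases y4 <;> cases c1 <;> cases c2 <;> simp <;> omega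
  · by_cases h1 : v = "Transportation_Yes"
    · subst h1; cases y1 <;> cases y2 <;> cases y3 <;> cases y4 <;> cases c1 <;> cases c2 <;> simp <;> omega
    by_cases h2 : v = "TimeOffWork_Yes"
    · subst h2; cases y1 <;> cases y2 <;> cases y3 <;> cases y4 <;> cases c1 <;> cases c2 <;> simp <;> omega
    by_cases h3 : v = "ChildCare_Yes"
    · subst h3; cases y1 <;> cases y2 <;> cases y3 <;> cases y4 <;> cases c1 <;> cases c2 <;> simp <;> omega
    by_cases h4 : v = "ElderlyCare_Yes"
    · subst h4; cases y1 <;> cases y2 <;> cases y3 <;> cases y4 <;> cases c1 <;> cases c2 <;> simp <;> omega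
    by_cases h5 : v = "DelayedOrNoCare_Always"
    · subst h5; cases y1 <;> cases y2 <;> cases y3 <;> cases y4 <;> cases c1 <;> cases c2 <;> simp <;> omega
    by_cases h6 : v = "DelayedOrNoCare_MostOfTheTime"
    · subst h6; cases y1 <;> cases y2 <;> cases y3 <;> cases y4 <;> cases c1 <;> cases c2 <;> simp <;> omega
    by_cases h7 : v = "DelayedOrNoCare_SomeOfTheTime"
    · subst h7; cases y1 <;> cases y2 <;> cases y3 <;> cases y4 <;> cases c1 <;> cases c2 <;> simp <;> omega
    have hr : ∀ t : String, v ≠ t → ((some v == some t) : Bool) = false := by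
      intro t ht; simp [ht]
    simp only [hr _ h1, hr _ h2, hr _ h3, hr _ h4, hr _ h5, hr _ h6, hr _ h7]
    cases y1 <;> cases y2 <;> cases y3 <;> cases y4 <;> cases c1 <;> cases c2 <;> simp <;> omega
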